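-- pv_equiv track=rewrite | github.com/JGsouzaa/AutoBeam | Modules/main.py | lista_dispensa
-- ===== SOURCE A (Python) =====
-- i2 = 0
--
-- def lista_dispensa(TotalBars):
--     #Lista de dispensas
--     lista_dispensa = []
--     #Verificação se o número de barras é par ou impar (Altera a lista de barras que podem ser dispensadas)
--     if TotalBars %2 == 0:
--         lista_dispensa = [2]
--         i2 = 0
--         for k in range(2, TotalBars - 2):
--         #Adicionando barras pares na lista
--             if k % 2 == 0:
--                 lista_dispensa.append(k + lista_dispensa[i2])
--     else:
--         lista_dispensa = [1]
--         i2 = 0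
--         for k in range(1, TotalBars - 1):
--         #Adicionando barras pares na lista
--             if k % 2 == 0:
--                 lista_dispensa.append(k + lista_dispensa[i2])
--     return(lista_dispensa)
-- ===== SOURCE B (Python) =====
-- def lista_dispensa(TotalBars):
--     # Closed form: the loop only ever adds the base element (index 0 stays fixed),
--     # so the result is an arithmetic progression with step 2.
--     if TotalBars % 2 == 0:
--         return [2] + list(range(4, TotalBars, 2))
--     return [1] + list(range(3, TotalBars, 2))
-- ===== Notes on version B (the rewrite author's own statement) =====
-- stated objective: idiomatic
-- what changed: Replaces the filtered self-referential append loop (which only ever re-reads the fixed base element at index 0) with a direct closed-form range construction: [2]+range(4,n,2) for even n, [1]+range(3,n,2) for odd n.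
import Mathlib
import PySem

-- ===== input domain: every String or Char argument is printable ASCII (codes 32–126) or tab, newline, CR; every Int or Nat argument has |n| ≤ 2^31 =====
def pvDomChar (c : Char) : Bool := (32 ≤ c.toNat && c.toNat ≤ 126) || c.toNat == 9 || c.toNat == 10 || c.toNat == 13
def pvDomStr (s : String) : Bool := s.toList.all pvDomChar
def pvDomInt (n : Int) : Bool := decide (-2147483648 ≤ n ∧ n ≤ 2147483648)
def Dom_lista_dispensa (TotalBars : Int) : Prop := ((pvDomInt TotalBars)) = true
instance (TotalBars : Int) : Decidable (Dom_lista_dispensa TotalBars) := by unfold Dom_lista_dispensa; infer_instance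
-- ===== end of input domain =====

-- B replaces A's filtered self-referential append loop (which only ever re-reads the fixed
-- base element at index 0) by a direct arithmetic-progression (range) construction; objective: idiomatic/simpler.

-- ===== PORT A =====
-- loop body of A: append k + lista[0] when k is even ('lista_dispensa[i2]' with i2 = 0;
-- the accumulator is never empty, so Python's index 0 always succeeds — .getD 0 is never taken)
def pvStepA (acc : List Int) (k : Int) : List Int :=
  if PySem.Int.mod k 2 == 0 then acc ++ [k + (PySem.List.pyGet? acc 0).getD 0] else acc

def lista_dispensa (TotalBars : Int) : List Int :=
  if PySem.Int.mod TotalBars 2 == 0 then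
    (PySem.List.pyRange 2 (TotalBars - 2) 1).foldl pvStepA [2]
  else
    (PySem.List.pyRange 1 (TotalBars - 1) 1).foldl pvStepA [1]

-- ===== PORT B =====
def lista_dispensa_alt (TotalBars : Int) : List Int :=
  if PySem.Int.mod TotalBars 2 == 0 then
    2 :: PySem.List.pyRange 4 TotalBars 2
  else
    1 :: PySem.List.pyRange 3 TotalBars 2

-- ===== PRECONDITION & SPEC =====
def Spec_lista_dispensa (TotalBars : Int) (out : List Int) : Prop := out = lista_dispensa_alt TotalBars
instance (TotalBars : Int) (out : List Int) : Decidable (Spec_lista_dispensa TotalBars out) := by unfold Spec_lista_dispensa; infer_instance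

-- ===== CLAIM (what is proved, stated in full; the proofs are below) =====
def Claim_equal_lista_dispensa : Prop := ∀ (TotalBars : Int), Dom_lista_dispensa TotalBars → Spec_lista_dispensa TotalBars (lista_dispensa TotalBars)

-- ===== LEMMAS AND PROOFS =====

theorem pvMod_two (x : Int) : PySem.Int.mod x 2 = x % 2 := by
  simp [PySem.Int.mod, Int.fmod_eq_emod]

-- A's even-branch loop over range(2, 2+m) in closed form
theorem pvEvenLoop (m : Nat) :
    (PySem.List.pyRange 2 (2 + (m : Int)) 1).foldl pvStepA [2]
      = 2 :: (List.range ((m + 1) / 2)).map (fun k : Nat => (4 : Int) + 2 * (k : Int)) := by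
  induction m with
  | zero => simp [PySem.List.pyRange_one_eq_nil]
  | succ m ih =>
    have hc : ((m + 1 : Nat) : Int) = (m : Int) + 1 := by push_cast; ring
    rw [hc, show (2 : Int) + ((m : Int) + 1) = (2 + (m : Int)) + 1 by ring,
       PySem.List.pyRange_one_succ_right (by omega), List.foldl_append, ih]
    unfold pvStepA
    simp only [List.foldl_cons, List.foldl_nil]
    rcases Nat.even_or_odd m with he | ho
    · obtain ⟨t, ht⟩ := he
      have hmod : PySem.Int.mod (2 + (m : Int)) 2 = 0 := by rw [pvMod_two]; omega
      rw [hmod]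
      have hv : (2 + (m : Int)) + (PySem.List.pyGet? (2 :: (List.range ((m + 1) / 2)).map (fun k : Nat => (4 : Int) + 2 * (k : Int))) 0).getD 0
          = 4 + 2 * ((((m + 1) / 2 : Nat)) : Int) := by
        rw [PySem.List.pyGet?_zero_cons]
        simp only [Option.getD_some]
        omega
      rw [show ((0 : Int) == 0) = true from rfl, if_pos rfl, hv,
        show (m + 1 + 1) / 2 = (m + 1) / 2 + 1 from by omega, List.range_succ, List.map_append]
      simp
    · obtain ⟨t, ht⟩ := ho
      have hmod : PySem.Int.mod (2 + (m : Int)) 2 = 1 := by rw [pvMod_two]; omega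
      rw [hmod, show (m + 1 + 1) / 2 = (m + 1) / 2 from by omega]
      norm_num

-- A's odd-branch loop over range(1, 1+m) in closed form
theorem pvOddLoop (m : Nat) :
    (PySem.List.pyRange 1 (1 + (m : Int)) 1).foldl pvStepA [1]
      = 1 :: (List.range (m / 2)).map (fun k : Nat => (3 : Int) + 2 * (k : Int)) := by
  induction m with
  | zero => simp [PySem.List.pyRange_one_eq_nil]
  | succ m ih =>
    have hc : ((m + 1 : Nat) : Int) = (m : Int) + 1 := by push_cast; ring
    rw [hc, show (1 : Int) + ((m : Int) + 1) = (1 + (m : Int)) + 1 by ring,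
       PySem.List.pyRange_one_succ_right (by omega), List.foldl_append, ih]
    unfold pvStepA
    simp only [List.foldl_cons, List.foldl_nil]
    rcases Nat.even_or_odd m with he | ho
    · obtain ⟨t, ht⟩ := he
      have hmod : PySem.Int.mod (1 + (m : Int)) 2 = 1 := by rw [pvMod_two]; omega
      rw [hmod, show (m + 1) / 2 = m / 2 from by omega]
      norm_num
    · obtain ⟨t, ht⟩ := ho
      have hmod : PySem.Int.mod (1 + (m : Int)) 2 = 0 := by rw [pvMod_two]; omega
      rw [hmod]
      have hv : (1 + (m : Int)) + (PySem.List.pyGet? (1 :: (List.range (m / 2)).map (fun k : Nat => (3 : Int) + 2 * (k : Int))) 0).getD 0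
          = 3 + 2 * (((m / 2 : Nat)) : Int) := by
        rw [PySem.List.pyGet?_zero_cons]
        simp only [Option.getD_some]
        omega
      rw [show ((0 : Int) == 0) = true from rfl, if_pos rfl, hv,
        show (m + 1) / 2 = m / 2 + 1 from by omega, List.range_succ, List.map_append]
      simp

-- B's step-2 range in the same map-over-List.range form
theorem pvRangeTwo (a b : Int) :
    PySem.List.pyRange a b 2
      = (List.range (if a < b then ((b - a + 1) / 2).toNat else 0)).map (fun k : Nat => a + 2 * (k : Int)) := by
  rw [PySem.List.pyRange_of_pos a b (by norm_num),
    show b - a + 2 - 1 = b - a + 1 from by ring]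

-- ===== VERDICT (by name: the statement is the Claim_ definition above) =====
theorem lista_dispensa_spec : Claim_equal_lista_dispensa := by
  intro n _
  unfold Spec_lista_dispensa lista_dispensa lista_dispensa_alt
  rw [pvMod_two]
  by_cases hp : n % 2 = 0
  · rw [if_pos (by simp [hp]), if_pos (by simp [hp]), pvRangeTwo]
    by_cases h2 : 3 < n
    · have hm : (2 : Int) + ((n - 4).toNat : Int) = n - 2 := by omega
      have hE := pvEvenLoop (n - 4).toNat
      rw [hm] at hE
      rw [hE]
      have hcnt : ((n - 4).toNat + 1) / 2 = (if 4 < n then ((n - 4 + 1) / 2).toNat else 0) := by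
        split <;> omega
      rw [hcnt]
    · rw [PySem.List.pyRange_one_eq_nil (show n - 2 ≤ 2 from by omega),
        if_neg (show ¬ (4 : Int) < n from by omega)]
      simp
  · have hp1 : n % 2 = 1 := (Int.emod_two_eq_zero_or_one n).resolve_left hp
    rw [if_neg (by simp [hp1]), if_neg (by simp [hp1]), pvRangeTwo]
    by_cases h1 : 1 < n
    · have hm : (1 : Int) + ((n - 2).toNat : Int) = n - 1 := by omega
      have hO := pvOddLoop (n - 2).toNat
      rw [hm] at hO
      rw [hO]
      have hcnt : (n - 2).toNat / 2 = (if 3 < n then ((n - 3 + 1) / 2).toNat else 0) := by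
        split <;> omega
      rw [hcnt]
    · rw [PySem.List.pyRange_one_eq_nil (show n - 1 ≤ 1 from by omega),
        if_neg (show ¬ (3 : Int) < n from by omega)]
      simp
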